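-- pv_equiv track=rewrite | github.com/KingHyoman/CodingTest | Programmers/braketgenerate_2.py | solution
-- ===== SOURCE A (Python) =====
-- def checkBracket(s):
--     # For check it is "correct"
--     # Using stack
--     stack = []
--     return_bit = True
--     for bracket in s:
--         if not stack and bracket == ')':
--             return_bit = False
--             break
--         if bracket == '(':
--             stack.append(bracket)
--         elif bracket == ')':
--             if stack[-1] == '(':
--                 stack.pop()
--             else:
--                 return_bit = False
--                 break
--     return return_bit
--
-- def breakBracket(s):
--     # To separate into two string
--     # u is the minimum of 'balanced' from s
--     left, right = 0, 0
--     u, v = '', ''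
--     for bracket in s:
--         if bracket == '(':
--             left += 1
--         else:
--             right += 1
--         u += bracket
--         if left == right:
--             break
--     v = s[left + right:]
--     return u, v
--
-- def solution(p):
--     # According to converting method
--
--     # step 1
--     if not p or checkBracket(p):
--         return p
--
--     # step 2
--     u, v = breakBracket(p)
--
--     # step 3
--     if checkBracket(u):
--         return u + solution(v)
--
--     # step 4
--     else:
--         var1 = '('
--         new_v = solution(v)
--         var1 = var1 + new_v + ')'
--         new_u = ''
--         for bracket in u[1:len(u) - 1]:
--             if bracket == '(':
--                 new_u += ')'
--             else:
--                 new_u += '('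
--
--         return var1 + new_u
-- ===== SOURCE B (Python) =====
-- def _ok(s):
--     # every prefix has at least as many '(' as ')'
--     bal = 0
--     for c in s:
--         if c == '(':
--             bal += 1
--         elif c == ')':
--             bal -= 1
--             if bal < 0:
--                 return False
--     return True
--
-- def _split(s):
--     # length of the shortest nonempty prefix in which '(' and non-'(' counts agree
--     bal = 0
--     i = 0
--     for c in s:
--         bal += 1 if c == '(' else -1
--         i += 1
--         if bal == 0:
--             break
--     return i
--
-- def solution(p):
--     # iterative: collect leading pieces in `pre`, pending wrap-suffixes in `post`
--     pre = []
--     post = []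
--     while p and not _ok(p):
--         i = _split(p)
--         u, p = p[:i], p[i:]
--         if _ok(u):
--             pre.append(u)
--         else:
--             pre.append('(')
--             post.append(')' + ''.join(')' if c == '(' else '(' for c in u[1:-1]))
--     pre.append(p)
--     pre.extend(reversed(post))
--     return ''.join(pre)
-- ===== Notes on version B (the rewrite author's own statement) =====
-- stated objective: faster
-- what changed: Replaces A's recursion with string concatenation, a char-by-char stack check and a char-appending prefix builder by an iterative loop over index-based slices using a balance counter, collecting output pieces in lists joined once at the end.
import Mathlib
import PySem

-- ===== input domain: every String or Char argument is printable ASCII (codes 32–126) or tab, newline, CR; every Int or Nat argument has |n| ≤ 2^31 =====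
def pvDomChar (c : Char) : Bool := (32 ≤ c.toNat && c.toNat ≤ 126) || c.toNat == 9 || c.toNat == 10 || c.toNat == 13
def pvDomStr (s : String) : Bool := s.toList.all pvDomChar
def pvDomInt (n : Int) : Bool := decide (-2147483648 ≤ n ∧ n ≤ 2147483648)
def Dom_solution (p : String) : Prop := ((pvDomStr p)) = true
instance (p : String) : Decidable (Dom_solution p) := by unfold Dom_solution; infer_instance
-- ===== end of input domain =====

-- B replaces A's recursion with string concatenation, stack-based check and char-by-char
-- prefix building by one iterative loop over index-based slices with a balance counter,
-- joining the collected pieces once at the end; return values agree on every input.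

-- ===== PORT A =====

-- checkBracket's for-loop with early break, stack explicit (stack.append → ++ [c], stack.pop → dropLast)
def checkGoA : List Char → List Char → Bool
  | [], _ => true
  | c :: rest, stack =>
    if stack.isEmpty && c == ')' then false
    else if c == '(' then checkGoA rest (stack ++ [c])
    else if c == ')' then
      -- stack[-1]; Python cannot raise here (the first guard already handled the empty stack)
      match PySem.List.pyGet? stack (-1) with
      | some '(' => checkGoA rest stack.dropLast
      | _ => false
    else checkGoA rest stack

def checkBracketA (s : List Char) : Bool := checkGoA s []

-- breakBracket's for-loop with early break; returns (left, right, u)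
def breakGoA : List Char → Int → Int → List Char → Int × Int × List Char
  | [], l, r, u => (l, r, u)
  | c :: rest, l, r, u =>
    let l' := if c == '(' then l + 1 else l
    let r' := if c == '(' then r else r + 1
    let u' := u ++ [c]
    if l' == r' then (l', r', u') else breakGoA rest l' r' u'

def breakBracketA (s : List Char) : List Char × List Char :=
  ((breakGoA s 0 0 []).2.2,
   PySem.List.slice s (some ((breakGoA s 0 0 []).1 + (breakGoA s 0 0 []).2.1)) none)  -- v = s[left + right:]

-- solution: A's four steps literally; the Nat argument is pure fuel (the recursion is on
-- breakBracket's strictly shorter v, so fuel = |p| + 1 always suffices; the 0 branch is unreachable)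
def solA : Nat → List Char → List Char
  | 0, _ => []
  | fuel + 1, p =>
    if p.isEmpty || checkBracketA p then p
    else
      let uv := breakBracketA p
      let u := uv.1
      let v := uv.2
      if checkBracketA u then u ++ solA fuel v
      else
        let var1 : List Char := ['(']
        let new_v := solA fuel v
        let var1' := var1 ++ new_v ++ [')']
        -- for bracket in u[1:len(u)-1]: new_u += flipped bracket
        let new_u := (PySem.List.slice u (some 1) (some (PySem.List.len u - 1))).foldl
          (fun acc c => acc ++ [if c == '(' then ')' else '(']) ([] : List Char)
        var1' ++ new_u

def solution (p : String) : String := String.ofList (solA (p.toList.length + 1) p.toList)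

-- ===== PORT B =====

-- _ok: balance counter, fail as soon as it goes negative
def balGoB : List Char → Int → Bool
  | [], _ => true
  | c :: rest, bal =>
    if c == '(' then balGoB rest (bal + 1)
    else if c == ')' then
      if bal - 1 < 0 then false else balGoB rest (bal - 1)
    else balGoB rest bal

def okB (s : List Char) : Bool := balGoB s 0

-- _split: index of the end of the shortest prefix with as many '(' as other characters
def splitGoB : List Char → Int → Nat → Nat
  | [], _, i => i
  | c :: rest, bal, i =>
    let bal' := bal + (if c == '(' then 1 else -1)
    if bal' == 0 then i + 1 else splitGoB rest bal' (i + 1)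

-- ''.join(')' if c == '(' else '(' for c in u[1:-1])
def flipB (u : List Char) : List Char :=
  ((u.drop 1).dropLast).map (fun c => if c == '(' then ')' else '(')

-- the while loop of B: pre collects leading pieces, post the pending wrap-suffixes (LIFO);
-- the Nat argument is pure fuel (p shrinks by ≥ 1 per iteration, so fuel = |p| + 1 suffices)
def goB : Nat → List Char → List (List Char) → List (List Char) → List Char
  | 0, _, _, _ => []
  | fuel + 1, p, pre, post =>
    if p.isEmpty || okB p then ((pre ++ [p]) ++ post.reverse).flatten
    else
      let i := splitGoB p 0 0
      let u := p.take i
      let v := p.drop i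
      if okB u then goB fuel v (pre ++ [u]) post
      else goB fuel v (pre ++ [['(']]) (post ++ [')' :: flipB u])

def solution_alt (p : String) : String := String.ofList (goB (p.toList.length + 1) p.toList [] [])

-- ===== PRECONDITION & SPEC =====
def Spec_solution (p : String) (out : String) : Prop := out = solution_alt p
instance (p : String) (out : String) : Decidable (Spec_solution p out) := by unfold Spec_solution; infer_instance

-- ===== CLAIM (what is proved, stated in full; the proofs are below) =====
def Claim_equal_solution : Prop := ∀ (p : String), Dom_solution p → Spec_solution p (solution p)

-- ===== LEMMAS AND PROOFS =====

-- A's stack always holds only '(' characters: it is exactly the counter of B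
lemma checkGoA_eq_balGoB : ∀ (s : List Char) (n : Nat),
    checkGoA s (List.replicate n '(') = balGoB s (n : Int) := by
  intro s
  induction s with
  | nil => intro n; simp [checkGoA, balGoB]
  | cons c rest ih =>
    intro n
    by_cases hc : c = '('
    · subst hc
      have h1 : List.replicate n '(' ++ ['('] = List.replicate (n + 1) '(' :=
        List.replicate_succ'.symm
      simp [checkGoA, balGoB, h1, ih (n + 1)]
    · by_cases hc2 : c = ')'
      · subst hc2
        cases n with
        | zero =>
          simp [checkGoA, balGoB]
        | succ m =>
          have h1 : List.replicate (m + 1) '(' = List.replicate m '(' ++ ['('] :=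
            List.replicate_succ'
          push_cast
          simp [checkGoA, balGoB, h1,
                PySem.List.pyGet?_neg_one_append_singleton, ih m,
                show (m : Int) + 1 - 1 = (m : Int) from by ring]
      · simp [checkGoA, balGoB, hc, hc2, ih n]

lemma checkBracketA_eq_okB (s : List Char) : checkBracketA s = okB s := by
  simpa [checkBracketA, okB] using checkGoA_eq_balGoB s 0

-- the accumulator of _split only shifts the result
lemma splitGoB_shift : ∀ (s : List Char) (bal : Int) (i : Nat),
    splitGoB s bal i = i + splitGoB s bal 0 := by
  intro s
  induction s with
  | nil => intro bal i; simp [splitGoB]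
  | cons c rest ih =>
    intro bal i
    simp only [splitGoB]
    split <;> split
    · omega
    · rw [ih _ (i + 1), ih _ (0 + 1)]; omega
    · omega
    · rw [ih _ (i + 1), ih _ (0 + 1)]; omega

lemma splitGoB_le : ∀ (s : List Char) (bal : Int) (i : Nat), i ≤ splitGoB s bal i := by
  intro s
  induction s with
  | nil => intro bal i; simp [splitGoB]
  | cons c rest ih =>
    intro bal i
    simp only [splitGoB]
    split <;> split <;> first | omega | exact le_trans (by omega) (ih _ (i + 1))

lemma splitGoB_pos (p : List Char) (hp : p ≠ []) : 1 ≤ splitGoB p 0 0 := by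
  obtain ⟨c, rest, rfl⟩ := List.exists_cons_of_ne_nil hp
  simp only [splitGoB]
  split <;> split <;> first | omega | exact le_trans (by omega) (splitGoB_le rest _ (0 + 1))

-- breakBracket's loop, related to B's split index (bal = left - right all along)
lemma breakGoA_u : ∀ (s : List Char) (l r : Int) (u : List Char),
    (breakGoA s l r u).2.2 = u ++ s.take (splitGoB s (l - r) 0) := by
  intro s
  induction s with
  | nil => intro l r u; simp [breakGoA, splitGoB]
  | cons c rest ih =>
    intro l r u
    simp only [breakGoA, splitGoB, beq_iff_eq]
    by_cases hc : c = '('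
    · simp only [if_pos hc]
      by_cases h : l + 1 = r
      · simp only [if_pos h, if_pos (show l - r + 1 = 0 from by omega)]
        simp [List.take_succ_cons]
      · simp only [if_neg h, if_neg (show ¬(l - r + 1 = 0) from by omega)]
        rw [ih (l + 1) r (u ++ [c]), splitGoB_shift rest _ (0 + 1),
            show l + 1 - r = l - r + 1 from by ring]
        simp [List.take_succ_cons, Nat.add_comm]
    · simp only [if_neg hc]
      by_cases h : l = r + 1
      · simp only [if_pos h, if_pos (show l - r + -1 = 0 from by omega)]
        simp [List.take_succ_cons]
      · simp only [if_neg h, if_neg (show ¬(l - r + -1 = 0) from by omega)]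
        rw [ih l (r + 1) (u ++ [c]), splitGoB_shift rest _ (0 + 1),
            show l - (r + 1) = l - r + -1 from by ring]
        simp [List.take_succ_cons, Nat.add_comm]

lemma breakGoA_sum : ∀ (s : List Char) (l r : Int) (u : List Char),
    (breakGoA s l r u).1 + (breakGoA s l r u).2.1 = l + r + splitGoB s (l - r) 0 := by
  intro s
  induction s with
  | nil => intro l r u; simp [breakGoA, splitGoB]
  | cons c rest ih =>
    intro l r u
    simp only [breakGoA, splitGoB, beq_iff_eq]
    by_cases hc : c = '('
    · simp only [if_pos hc]
      by_cases h : l + 1 = r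
      · simp only [if_pos h, if_pos (show l - r + 1 = 0 from by omega)]
        push_cast; omega
      · simp only [if_neg h, if_neg (show ¬(l - r + 1 = 0) from by omega)]
        rw [ih (l + 1) r (u ++ [c]), splitGoB_shift rest _ (0 + 1),
            show l + 1 - r = l - r + 1 from by ring]
        push_cast; omega
    · simp only [if_neg hc]
      by_cases h : l = r + 1
      · simp only [if_pos h, if_pos (show l - r + -1 = 0 from by omega)]
        push_cast; omega
      · simp only [if_neg h, if_neg (show ¬(l - r + -1 = 0) from by omega)]
        rw [ih l (r + 1) (u ++ [c]), splitGoB_shift rest _ (0 + 1),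
            show l - (r + 1) = l - r + -1 from by ring]
        push_cast; omega

lemma breakBracketA_eq (p : List Char) :
    breakBracketA p = (p.take (splitGoB p 0 0), p.drop (splitGoB p 0 0)) := by
  unfold breakBracketA
  have hu := breakGoA_u p 0 0 []
  have hs := breakGoA_sum p 0 0 []
  rw [show (0 : Int) - 0 = 0 from by ring] at hu hs
  rw [show (0 : Int) + 0 + (splitGoB p 0 0 : Int) = ((splitGoB p 0 0 : Nat) : Int) from by push_cast; ring] at hs
  rw [hs, PySem.List.slice_from_natCast]
  simp at hu
  rw [hu]

-- A's flip loop over u[1:len(u)-1] is B's map over u[1:-1]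
lemma flipA_eq (u : List Char) (hu : u ≠ []) :
    (PySem.List.slice u (some 1) (some (PySem.List.len u - 1))).foldl
      (fun acc c => acc ++ [if c == '(' then ')' else '(']) ([] : List Char) = flipB u := by
  have hlen : (PySem.List.len u - 1 : Int) = ((u.length - 1 : Nat) : Int) := by
    obtain ⟨a, t, rfl⟩ := List.exists_cons_of_ne_nil hu
    simp only [PySem.List.len_eq, List.length_cons]
    omega
  rw [hlen, show ((1 : Int)) = ((1 : Nat) : Int) from by norm_num, PySem.List.slice_natCast]
  have hslice : (u.drop 1).take (u.length - 1 - 1) = (u.drop 1).dropLast := by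
    rw [List.dropLast_eq_take]
    congr 1
    simp
  rw [hslice]
  simpa [flipB] using
    PySem.List.foldl_append_singleton_eq_map
      (fun c : Char => if c == '(' then ')' else '(') ((u.drop 1).dropLast) []

-- main loop invariant: goB produces pre ++ solA p ++ reversed post (any sufficient fuel)
lemma goB_eq_solA : ∀ (n : Nat) (p : List Char), p.length < n → ∀ (m : Nat), p.length < m →
    ∀ (pre post : List (List Char)),
    goB n p pre post = pre.flatten ++ solA m p ++ post.reverse.flatten := by
  intro n
  induction n with
  | zero => intro p hp; omega
  | succ n ih =>
    intro p hp m hm pre post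
    obtain ⟨m', rfl⟩ : ∃ m', m = m' + 1 := ⟨m - 1, by omega⟩
    rw [goB, solA]
    by_cases h : (p.isEmpty || checkBracketA p) = true
    · have h2 : (p.isEmpty || okB p) = true := by
        rw [← checkBracketA_eq_okB]; exact h
      rw [if_pos h2, if_pos h]
      simp
    · have h2 : ¬((p.isEmpty || okB p) = true) := by
        rw [← checkBracketA_eq_okB]; exact h
      rw [if_neg h2, if_neg h]
      have hpne : p ≠ [] := by
        simp only [Bool.or_eq_true, not_or] at h
        simpa using h.1
      have hkpos : 1 ≤ splitGoB p 0 0 := splitGoB_pos p hpne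
      have hplen : 1 ≤ p.length := List.length_pos_of_ne_nil hpne
      have hvn : (p.drop (splitGoB p 0 0)).length < n := by
        rw [List.length_drop]; omega
      have hvm : (p.drop (splitGoB p 0 0)).length < m' := by
        rw [List.length_drop]; omega
      have hune : p.take (splitGoB p 0 0) ≠ [] := by
        intro hemp
        have := congrArg List.length hemp
        simp only [List.length_take, List.length_nil] at this
        omega
      simp only [breakBracketA_eq]
      by_cases hu : checkBracketA (p.take (splitGoB p 0 0)) = true
      · rw [if_pos hu, if_pos (show okB (p.take (splitGoB p 0 0)) = true from by
          rw [← checkBracketA_eq_okB]; exact hu)]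
        rw [ih (p.drop (splitGoB p 0 0)) hvn m' hvm (pre ++ [p.take (splitGoB p 0 0)]) post]
        simp
      · rw [if_neg hu, if_neg (show ¬(okB (p.take (splitGoB p 0 0)) = true) from by
          rw [← checkBracketA_eq_okB]; exact hu)]
        rw [ih (p.drop (splitGoB p 0 0)) hvn m' hvm (pre ++ [['(']])
            (post ++ [')' :: flipB (p.take (splitGoB p 0 0))])]
        rw [flipA_eq (p.take (splitGoB p 0 0)) hune]
        simp

-- ===== VERDICT (by name: the statement is the Claim_ definition above) =====
theorem solution_spec : Claim_equal_solution := by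
  unfold Claim_equal_solution Spec_solution
  intro p _
  unfold solution solution_alt
  rw [goB_eq_solA (p.toList.length + 1) p.toList (by omega) (p.toList.length + 1) (by omega) [] []]
  simp
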